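-- pv_equiv track=rewrite | github.com/blackboxprogramming/blackroad-prism-console | services/handle_mint/app.py | is_reserved
-- ===== SOURCE A (Python) =====
-- from typing import Dict, List, Optional, Set
--
-- RESERVED_TERMS: Set[str] = {
--     "admin",
--     "root",
--     "support",
--     "help",
--     "billing",
--     "payments",
--     "security",
--     "abuse",
--     "postmaster",
--     "hostmaster",
--     "webmaster",
--     "mailer-daemon",
--     "official",
--     "team",
--     "staff",
--     "system",
--     "null",
--     "void",
-- }
--
-- def is_reserved(handle: str) -> bool:
--     return any(
--         handle == term
--         or handle.startswith(term)
--         or handle.endswith(term)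
--         or handle.startswith(f"{term}-")
--         or handle.startswith(f"{term}_")
--         or handle.endswith(f"-{term}")
--         or handle.endswith(f"_{term}")
--         for term in RESERVED_TERMS
--     )
-- ===== SOURCE B (Python) =====
-- RESERVED_TERMS = {
--     "admin", "root", "support", "help", "billing", "payments", "security",
--     "abuse", "postmaster", "hostmaster", "webmaster", "mailer-daemon",
--     "official", "team", "staff", "system", "null", "void",
-- }
--
-- _MAX_LEN = max(map(len, RESERVED_TERMS))
--
-- def is_reserved(handle: str) -> bool:
--     n = len(handle)
--     for L in range(1, min(n, _MAX_LEN) + 1):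
--         if handle[:L] in RESERVED_TERMS or handle[n - L:] in RESERVED_TERMS:
--             return True
--     return False
-- ===== Notes on version B (the rewrite author's own statement) =====
-- stated objective: alternative
-- what changed: B inverts the traversal: instead of scanning the 18-term reserved set and testing seven redundant startswith/endswith conditions per term, it enumerates the handle's prefix/suffix lengths L from 1 up to min(len(handle), longest term) and does two hashed set-membership lookups per L, since A's conditions collapse to a reserved term being a prefix or suffix of the handle.
import Mathlib
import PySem

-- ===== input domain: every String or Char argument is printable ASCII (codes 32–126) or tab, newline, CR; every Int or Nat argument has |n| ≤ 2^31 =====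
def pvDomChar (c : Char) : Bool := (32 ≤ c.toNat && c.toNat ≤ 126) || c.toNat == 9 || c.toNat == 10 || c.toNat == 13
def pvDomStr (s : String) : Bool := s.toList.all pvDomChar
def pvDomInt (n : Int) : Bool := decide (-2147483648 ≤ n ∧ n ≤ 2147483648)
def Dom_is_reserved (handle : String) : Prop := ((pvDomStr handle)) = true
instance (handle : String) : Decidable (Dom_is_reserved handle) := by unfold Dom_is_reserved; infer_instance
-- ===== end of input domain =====

-- B iterates over the handle's prefix/suffix lengths with set lookups instead of scanning the
-- term set with startswith/endswith; same return value everywhere (objective: alternative).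

-- ===== PORT A =====
-- RESERVED_TERMS (iteration order of the Python set is irrelevant: only `any` of it is used)
def pvTerms : List (List Char) :=
  ["admin".toList, "root".toList, "support".toList, "help".toList, "billing".toList,
   "payments".toList, "security".toList, "abuse".toList, "postmaster".toList,
   "hostmaster".toList, "webmaster".toList, "mailer-daemon".toList, "official".toList,
   "team".toList, "staff".toList, "system".toList, "null".toList, "void".toList]

def is_reserved (handle : String) : Bool :=
  pvTerms.any (fun term =>
    handle.toList == term
    || PySem.Chars.startswith handle.toList term
    || PySem.Chars.endswith handle.toList term
    || PySem.Chars.startswith handle.toList (term ++ ['-'])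
    || PySem.Chars.startswith handle.toList (term ++ ['_'])
    || PySem.Chars.endswith handle.toList ('-' :: term)
    || PySem.Chars.endswith handle.toList ('_' :: term))

-- ===== PORT B =====
def pvMaxLen : Int := ((pvTerms.map (fun t => PySem.Chars.len t)).max?).getD 0

def is_reserved_alt (handle : String) : Bool :=
  let cs := handle.toList
  let n : Int := PySem.Chars.len cs
  (PySem.List.pyRange 1 (min n pvMaxLen + 1) 1).any (fun L =>
    pvTerms.contains (PySem.Chars.slice cs (some 0) (some L))
    || pvTerms.contains (PySem.Chars.slice cs (some (n - L)) none))

-- ===== PRECONDITION & SPEC =====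
def Spec_is_reserved (handle : String) (out : Bool) : Prop := out = is_reserved_alt handle
instance (handle : String) (out : Bool) : Decidable (Spec_is_reserved handle out) := by unfold Spec_is_reserved; infer_instance

-- ===== CLAIM (what is proved, stated in full; the proofs are below) =====
def Claim_equal_is_reserved : Prop := ∀ (handle : String), Dom_is_reserved handle → Spec_is_reserved handle (is_reserved handle)

-- ===== LEMMAS AND PROOFS =====

theorem pvTerms_ne_nil : ∀ t ∈ pvTerms, 1 ≤ t.length := by decide

theorem pvTerms_len_le : ∀ t ∈ pvTerms, t.length ≤ 13 := by decide

theorem pvMaxLen_eq : pvMaxLen = 13 := by decide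

theorem is_reserved_iff (handle : String) :
    is_reserved handle = true ↔
      ∃ t ∈ pvTerms, t <+: handle.toList ∨ t <:+ handle.toList := by
  unfold is_reserved
  rw [List.any_eq_true]
  constructor
  · rintro ⟨t, ht, h⟩
    simp only [Bool.or_eq_true, beq_iff_eq, PySem.Chars.startswith_iff,
      PySem.Chars.endswith_iff] at h
    refine ⟨t, ht, ?_⟩
    rcases h with ((((((h|h)|h)|h)|h)|h)|h)
    · exact Or.inl (by rw [h])
    · exact Or.inl h
    · exact Or.inr h
    · exact Or.inl ((List.prefix_append t ['-']).trans h)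
    · exact Or.inl ((List.prefix_append t ['_']).trans h)
    · exact Or.inr ((List.suffix_cons '-' t).trans h)
    · exact Or.inr ((List.suffix_cons '_' t).trans h)
  · rintro ⟨t, ht, h⟩
    refine ⟨t, ht, ?_⟩
    simp only [Bool.or_eq_true, beq_iff_eq, PySem.Chars.startswith_iff,
      PySem.Chars.endswith_iff]
    rcases h with h|h
    · exact Or.inl (Or.inl (Or.inl (Or.inl (Or.inl (Or.inr h)))))
    · exact Or.inl (Or.inl (Or.inl (Or.inl (Or.inr h))))

theorem is_reserved_alt_iff (handle : String) :
    is_reserved_alt handle = true ↔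
      ∃ t ∈ pvTerms, t <+: handle.toList ∨ t <:+ handle.toList := by
  simp only [is_reserved_alt, pvMaxLen_eq, List.any_eq_true, Bool.or_eq_true,
    PySem.List.mem_pyRange_one, PySem.Chars.slice_eq_listSlice, PySem.Chars.len_eq,
    List.contains_iff_mem]
  constructor
  · rintro ⟨L, ⟨h1, h2⟩, (h|h)⟩
    · rw [PySem.List.slice_zero_start, PySem.List.slice_to _ (by omega)] at h
      exact ⟨_, h, Or.inl (List.take_prefix _ _)⟩
    · rw [PySem.List.slice_from _ (by omega)] at h
      exact ⟨_, h, Or.inr (List.drop_suffix _ _)⟩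
  · rintro ⟨t, ht, (hp|hs)⟩
    · have hl : 1 ≤ t.length := pvTerms_ne_nil t ht
      have h13 : t.length ≤ 13 := pvTerms_len_le t ht
      have hle : t.length ≤ handle.toList.length := hp.length_le
      refine ⟨(t.length : Int), ⟨by exact_mod_cast hl, by omega⟩, Or.inl ?_⟩
      rw [PySem.List.slice_zero_start, PySem.List.slice_to _ (by positivity)]
      rw [Int.toNat_natCast, ← List.prefix_iff_eq_take.mp hp]
      exact ht
    · have hl : 1 ≤ t.length := pvTerms_ne_nil t ht
      have h13 : t.length ≤ 13 := pvTerms_len_le t ht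
      have hle : t.length ≤ handle.toList.length := hs.length_le
      refine ⟨(t.length : Int), ⟨by exact_mod_cast hl, by omega⟩, Or.inr ?_⟩
      rw [PySem.List.slice_from _ (by omega)]
      have htn : ((handle.toList.length : Int) - (t.length : Int)).toNat
          = handle.toList.length - t.length := by omega
      rw [htn, ← List.suffix_iff_eq_drop.mp hs]
      exact ht

-- ===== VERDICT (by name: the statement is the Claim_ definition above) =====
theorem is_reserved_spec : Claim_equal_is_reserved := by
  intro handle _
  unfold Spec_is_reserved
  have := (is_reserved_iff handle).trans (is_reserved_alt_iff handle).symm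
  cases ha : is_reserved handle <;> cases hb : is_reserved_alt handle <;> simp_all
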